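-- pv_equiv track=rewrite | github.com/rmei6/DS-A | Reduce_the_Array.py | minimizeCost
-- ===== SOURCE A (Python) =====
-- import bisect
--
-- def minimizeCost(arr):
--     # Write your code here
--     if len(arr) == 1:
--         return 0
--     arr = sorted(arr)
--     total = 0
--     while len(arr) > 1:
--         item1, item2 = arr[0], arr[1]
--         del arr[0:2]
--         total += item1 + item2
--         bisect.insort(arr, item1 + item2)
--     return total
-- ===== SOURCE B (Python) =====
-- def minimizeCost(arr):
--     # Alternative strategy: keep the pool unsorted; each round select the two
--     # smallest values directly (min + remove) instead of maintaining a sorted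
--     # list with binary insertion.  Same combine-two-smallest total.
--     if len(arr) <= 1:
--         return 0
--     items = list(arr)
--     total = 0
--     while len(items) > 1:
--         x = min(items)
--         items.remove(x)
--         y = min(items)
--         items.remove(y)
--         s = x + y
--         total += s
--         items.append(s)
--     return total
-- ===== Notes on version B (the rewrite author's own statement) =====
-- stated objective: alternative
-- what changed: A keeps the pool as a sorted list (sort once, pop the first two, bisect.insort the sum); B keeps it unsorted and each round selects the two smallest by min() + remove() and appends the sum, with no sorting or binary insertion at all.
import Mathlib
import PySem

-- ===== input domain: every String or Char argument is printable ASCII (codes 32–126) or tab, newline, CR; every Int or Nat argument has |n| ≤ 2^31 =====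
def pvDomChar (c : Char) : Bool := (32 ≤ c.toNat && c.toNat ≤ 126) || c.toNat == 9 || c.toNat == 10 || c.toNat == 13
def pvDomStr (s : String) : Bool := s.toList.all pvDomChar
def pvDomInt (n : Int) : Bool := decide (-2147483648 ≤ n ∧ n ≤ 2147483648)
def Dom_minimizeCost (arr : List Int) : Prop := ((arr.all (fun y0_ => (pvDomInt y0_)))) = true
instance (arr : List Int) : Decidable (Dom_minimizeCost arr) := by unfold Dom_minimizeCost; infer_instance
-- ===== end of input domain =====

-- B repeatedly selects the two smallest values from an unsorted pool (min + remove)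
-- instead of A's sorted list maintained by binary insertion; same total, alternative structure.

-- ===== PORT A =====
-- bisect.insort(xs, v): insert v after existing equals, at position bisect_right(xs, v)
def insortA (xs : List Int) (v : Int) : List Int :=
  let i := PySem.List.bisectRight xs v
  xs.take i ++ v :: xs.drop i

-- the 'while len(arr) > 1' loop of A, over (arr, total)
def loopA : List Int → Int → Int
  | a :: b :: rest, total => loopA (insortA rest (a + b)) (total + (a + b))
  | _, total => total
termination_by xs _ => xs.length
decreasing_by
  simp [insortA]

def minimizeCost (arr : List Int) : Int :=
  if PySem.List.len arr = 1 then 0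
  else loopA (PySem.List.sorted arr (fun x => x)) 0

-- ===== PORT B =====
-- the 'while len(items) > 1' loop of B: x = min(items); items.remove(x); y = min(items);
-- items.remove(y); items.append(x+y). Fuel (length of arr) only makes the recursion
-- structural; the loop's own guard is the length test.
def loopB : Nat → List Int → Int → Int
  | 0, _, total => total
  | fuel + 1, items, total =>
    if items.length ≤ 1 then total
    else
      match PySem.List.min? items (fun x => x) with
      | none => total
      | some x =>
        match PySem.List.remove? items x with
        | none => total
        | some items1 =>
          match PySem.List.min? items1 (fun x => x) with
          | none => total
          | some y =>
            match PySem.List.remove? items1 y with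
            | none => total
            | some items2 => loopB fuel (items2 ++ [x + y]) (total + (x + y))

def minimizeCost_alt (arr : List Int) : Int :=
  if arr.length ≤ 1 then 0 else loopB arr.length arr 0

-- ===== PRECONDITION & SPEC =====
def Spec_minimizeCost (arr : List Int) (out : Int) : Prop := out = minimizeCost_alt arr
instance (arr : List Int) (out : Int) : Decidable (Spec_minimizeCost arr out) := by unfold Spec_minimizeCost; infer_instance

-- ===== CLAIM (what is proved, stated in full; the proofs are below) =====
def Claim_equal_minimizeCost : Prop := ∀ (arr : List Int), Dom_minimizeCost arr → Spec_minimizeCost arr (minimizeCost arr)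

-- ===== LEMMAS AND PROOFS =====

lemma loopA_nil (t : Int) : loopA [] t = t := by
  rw [loopA]; intro a b r h; cases h

lemma loopA_one (a t : Int) : loopA [a] t = t := by
  rw [loopA]; intro x b r h; cases h

lemma loopA_cons (a b t : Int) (rest : List Int) :
    loopA (a :: b :: rest) t = loopA (insortA rest (a + b)) (t + (a + b)) := by
  rw [loopA]

lemma insortA_perm (xs : List Int) (v : Int) : (insortA xs v).Perm (v :: xs) := by
  unfold insortA
  have h := @List.perm_middle Int v (xs.take (PySem.List.bisectRight xs v))
      (xs.drop (PySem.List.bisectRight xs v))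
  rwa [List.take_append_drop] at h

lemma insortA_sorted (xs : List Int) (v : Int) (h : List.Pairwise (· ≤ ·) xs) :
    List.Pairwise (· ≤ ·) (insortA xs v) := by
  obtain ⟨hle, hbefore, hafter⟩ := PySem.List.bisectRight_spec xs v h
  unfold insortA
  rw [List.pairwise_append]
  refine ⟨h.sublist (List.take_sublist _ _), ?_, ?_⟩
  · rw [List.pairwise_cons]
    refine ⟨?_, h.sublist (List.drop_sublist _ _)⟩
    intro z hz
    rw [List.mem_drop_iff_getElem] at hz
    obtain ⟨k, hk, rfl⟩ := hz
    exact le_of_lt (hafter _ (by omega) (by omega))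
  · intro p hp q hq
    rw [List.mem_take_iff_getElem] at hp
    obtain ⟨j, hj, rfl⟩ := hp
    rcases List.mem_cons.mp hq with rfl | hq
    · exact hbefore _ (by omega) (by omega)
    · rw [List.mem_drop_iff_getElem] at hq
      obtain ⟨k, hk, rfl⟩ := hq
      exact List.pairwise_iff_getElem.mp h j _ (by omega) (by omega) (by omega)

lemma insortA_length (xs : List Int) (v : Int) :
    (insortA xs v).length = xs.length + 1 := by
  have := (insortA_perm xs v).length_eq
  simpa using this

-- if items is a permutation of a sorted list with head a, then min(items) = a
lemma min_of_perm_sorted (items a : _) (t : List Int)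
    (hs : List.Pairwise (· ≤ ·) (a :: t)) (hp : items.Perm (a :: t)) :
    PySem.List.min? items (fun x => x) = some a := by
  have hne : items ≠ [] := by
    intro h; subst h; exact (List.cons_ne_nil a t) hp.symm.eq_nil
  obtain ⟨m, hm⟩ : ∃ m, PySem.List.min? items (fun x => x) = some m := by
    cases hmin : PySem.List.min? items (fun x => x) with
    | none => exact absurd ((PySem.List.min?_eq_none_iff items (fun x => x)).mp hmin) hne
    | some m => exact ⟨m, rfl⟩
  have hmem : m ∈ a :: t := hp.mem_iff.mp (PySem.List.min?_mem hm)
  have hma : m ≤ a := PySem.List.min?_isMin hm a (hp.mem_iff.mpr (List.mem_cons_self))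
  have ham : a ≤ m := by
    rcases List.mem_cons.mp hmem with rfl | hmt
    · exact le_refl m
    · exact (List.pairwise_cons.mp hs).1 m hmt
  rw [hm, le_antisymm hma ham]

-- core invariant: A's loop on the sorted list equals B's loop on any permutation of it
lemma loop_eq (fuel : Nat) : ∀ (s items : List Int) (total : Int),
    List.Pairwise (· ≤ ·) s → items.Perm s → s.length ≤ fuel →
    loopA s total = loopB fuel items total := by
  induction fuel with
  | zero =>
    intro s items total _ hp hlen
    have hs : s = [] := List.length_eq_zero_iff.mp (by omega)
    subst hs
    rw [hp.eq_nil, loopA_nil]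
    rfl
  | succ n ih =>
    intro s items total hsort hp hlen
    match s with
    | [] =>
      rw [hp.eq_nil, loopA_nil]
      simp [loopB]
    | [a] =>
      have h1 : items.length = 1 := by simpa using hp.length_eq
      rw [loopA_one]
      simp [loopB, h1]
    | a :: b :: rest =>
      have hlen2 : items.length = rest.length + 2 := by simpa using hp.length_eq
      have hmin1 : PySem.List.min? items (fun x => x) = some a :=
        min_of_perm_sorted items a (b :: rest) hsort hp
      have hain : a ∈ items := hp.mem_iff.mpr (List.mem_cons_self)
      have hrem1 : PySem.List.remove? items a = some (items.erase a) :=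
        PySem.List.remove?_eq_some_erase items a hain
      have hp1 : (items.erase a).Perm (b :: rest) := by
        have := hp.erase a
        rwa [List.erase_cons_head] at this
      have hsort1 : List.Pairwise (· ≤ ·) (b :: rest) := (List.pairwise_cons.mp hsort).2
      have hmin2 : PySem.List.min? (items.erase a) (fun x => x) = some b :=
        min_of_perm_sorted (items.erase a) b rest hsort1 hp1
      have hbin : b ∈ items.erase a := hp1.mem_iff.mpr (List.mem_cons_self)
      have hrem2 : PySem.List.remove? (items.erase a) b = some ((items.erase a).erase b) :=
        PySem.List.remove?_eq_some_erase _ b hbin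
      have hp2 : ((items.erase a).erase b).Perm rest := by
        have := hp1.erase b
        rwa [List.erase_cons_head] at this
      have hpnew : ((items.erase a).erase b ++ [a + b]).Perm (insortA rest (a + b)) :=
        ((hp2.append_right [a + b]).trans (List.perm_append_singleton (a + b) rest)).trans
          (insortA_perm rest (a + b)).symm
      have hsnew : List.Pairwise (· ≤ ·) (insortA rest (a + b)) :=
        insortA_sorted rest (a + b) (List.pairwise_cons.mp hsort1).2
      have hlnew : (insortA rest (a + b)).length ≤ n := by
        rw [insortA_length]
        simp at hlen; omega
      show loopA (a :: b :: rest) total = loopB (n + 1) items total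
      rw [loopA_cons, loopB]
      simp only [hmin1, hrem1, hmin2, hrem2]
      rw [if_neg (by omega)]
      exact ih _ _ _ hsnew hpnew hlnew

lemma sorted_id_pairwise (xs : List Int) :
    List.Pairwise (· ≤ ·) (PySem.List.sorted xs (fun x => x)) :=
  PySem.List.sorted_pairwise xs (fun x => x)

-- ===== VERDICT (by name: the statement is the Claim_ definition above) =====
theorem minimizeCost_spec : Claim_equal_minimizeCost := by
  intro arr _
  unfold Spec_minimizeCost minimizeCost minimizeCost_alt
  have hperm := PySem.List.sorted_perm arr (fun x => x) false
  have hlen : (PySem.List.sorted arr (fun x => x)).length = arr.length := hperm.length_eq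
  by_cases h1 : arr.length = 1
  · rw [if_pos (by simp [PySem.List.len_eq]; omega), if_pos (by omega)]
  · by_cases h0 : arr.length = 0
    · have harr : arr = [] := List.length_eq_zero_iff.mp h0
      subst harr
      have hs0 : PySem.List.sorted [] (fun x : Int => x) = [] := rfl
      simp [PySem.List.len_eq, hs0, loopA_nil]
    · rw [if_neg (by simp [PySem.List.len_eq]; omega), if_neg (by omega)]
      exact loop_eq arr.length _ arr 0 (sorted_id_pairwise arr) hperm.symm (by omega)
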